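-- pv_equiv track=rewrite | github.com/taylorgag/DeepFusion | ProgmaSlicing/ree/progmaSlicing_code.py | splitTemp
-- ===== SOURCE A (Python) =====
-- def splitTemp(_str):
--     result = list()
--     flag = 0
--     temp = str()
--     for char in _str:
--         if char != "_":
--             temp += char
--         elif char == "_" and flag < 1:
--             temp = str()
--             flag += 1
--         elif char == "_" and flag == 1:
--             result.append(temp)
--             temp = str()
--             flag += 1
--         elif flag >= 2:
--             temp += char
--     result.append(temp)
--     return result[0], result[1]
-- ===== SOURCE B (Python) =====
-- def splitTemp(_str):
--     parts = _str.split("_", 2)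
--     return parts[1], parts[2]
-- ===== Notes on version B (the rewrite author's own statement) =====
-- stated objective: simpler
-- what changed: Replaced A's hand-rolled per-character state machine (flag/temp/result accumulators) with a single str.split('_', 2) followed by tuple indexing; fewer-than-two-underscore inputs, on which both raise IndexError, are excluded by Pre_.
-- outside the precondition, e.g. on splitTemp('_'): A raises IndexError, B raises IndexError
import Mathlib
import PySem

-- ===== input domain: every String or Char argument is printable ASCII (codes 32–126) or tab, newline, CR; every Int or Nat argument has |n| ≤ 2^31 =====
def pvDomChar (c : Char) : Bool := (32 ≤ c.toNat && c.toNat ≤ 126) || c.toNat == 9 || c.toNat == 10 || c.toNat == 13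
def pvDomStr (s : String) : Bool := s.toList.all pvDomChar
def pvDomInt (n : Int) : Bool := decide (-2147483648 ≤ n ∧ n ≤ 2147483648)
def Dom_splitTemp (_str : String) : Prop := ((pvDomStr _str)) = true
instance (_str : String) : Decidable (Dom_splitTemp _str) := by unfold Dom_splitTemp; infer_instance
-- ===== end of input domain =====

-- B replaces A's hand-rolled flag/state-machine character loop by a single library split("_", 2) plus tuple indexing (simpler).


-- ===== PORT A =====
-- the body of A's for-loop, on state (result, flag, temp); strings carried as List Char (exact on the domain)
def splitTempStep (s : List (List Char) × Int × List Char) (c : Char) :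
    List (List Char) × Int × List Char :=
  let result := s.1
  let flag := s.2.1
  let temp := s.2.2
  if c ≠ '_' then (result, flag, temp ++ [c])
  else if c = '_' ∧ flag < 1 then (result, flag + 1, ([] : List Char))
  else if c = '_' ∧ flag = 1 then (result ++ [temp], flag + 1, ([] : List Char))
  else if 2 ≤ flag then (result, flag, temp ++ [c])
  else (result, flag, temp)

def splitTemp (_str : String) : String × String :=
  let st := _str.toList.foldl splitTempStep ([], 0, [])
  let result := st.1 ++ [st.2.2]
  -- result[0], result[1]: Python raises IndexError when result is shorter; Pre_ excludes that
  (String.ofList (PySem.List.pyGetD result 0 []), String.ofList (PySem.List.pyGetD result 1 []))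

-- ===== PORT B =====
def splitTemp_alt (_str : String) : String × String :=
  let parts := (PySem.Str.splitMax? _str "_" 2).getD []
  -- parts[1], parts[2]: Python raises IndexError when parts is shorter; Pre_ excludes that
  (PySem.List.pyGetD parts 1 "", PySem.List.pyGetD parts 2 "")

-- ===== PRECONDITION & SPEC =====
-- Pre_ excludes exactly the strings with fewer than two underscores, on which BOTH A and B raise IndexError.
def Pre_splitTemp (_str : String) : Prop := 2 ≤ _str.toList.count '_'
instance (_str : String) : Decidable (Pre_splitTemp _str) := by unfold Pre_splitTemp; infer_instance
def pvWitness_splitTemp : String := "a_b_c"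

def Spec_splitTemp (_str : String) (out : String × String) : Prop := out = splitTemp_alt _str
instance (_str : String) (out : String × String) : Decidable (Spec_splitTemp _str out) := by unfold Spec_splitTemp; infer_instance

-- ===== CLAIM (what is proved, stated in full; the proofs are below) =====
def Claim_equal_splitTemp : Prop := ∀ (_str : String), Dom_splitTemp _str → Pre_splitTemp _str → Spec_splitTemp _str (splitTemp _str)

-- ===== LEMMAS AND PROOFS =====

-- A's loop once flag = 2: every character (underscores included) is appended to temp
theorem fold2 (cs : List Char) (result : List (List Char)) (temp : List Char) :
    cs.foldl splitTempStep (result, 2, temp) = (result, 2, temp ++ cs) := by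
  induction cs generalizing temp with
  | nil => simp
  | cons c cs ih =>
      by_cases hc : c = '_' <;>
        simp [List.foldl_cons, splitTempStep, hc, ih]

-- A's loop with flag = 1 over p ++ '_' :: rest, '_' ∉ p: append temp ++ p, then flag 2 collects rest
theorem fold1 (p : List Char) (hp : '_' ∉ p) (rest : List Char)
    (result : List (List Char)) (temp : List Char) :
    (p ++ '_' :: rest).foldl splitTempStep (result, 1, temp) = (result ++ [temp ++ p], 2, rest) := by
  induction p generalizing temp with
  | nil => simp [List.foldl_cons, splitTempStep, fold2]
  | cons c p ih =>
      have hc : c ≠ '_' := fun h => hp (h ▸ List.mem_cons_self)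
      have hp' : '_' ∉ p := fun h => hp (List.mem_cons_of_mem _ h)
      simp [List.foldl_cons, splitTempStep, hc, ih hp']

-- A's loop with flag = 0 over p ++ '_' :: rest, '_' ∉ p: the prefix p is discarded
theorem fold0 (p : List Char) (hp : '_' ∉ p) (rest temp : List Char) :
    (p ++ '_' :: rest).foldl splitTempStep ([], 0, temp) =
      rest.foldl splitTempStep ([], 1, []) := by
  induction p generalizing temp with
  | nil => simp [List.foldl_cons, splitTempStep]
  | cons c p ih =>
      have hc : c ≠ '_' := fun h => hp (h ▸ List.mem_cons_self)
      have hp' : '_' ∉ p := fun h => hp (List.mem_cons_of_mem _ h)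
      simp [List.foldl_cons, splitTempStep, hc, ih hp']

-- splitOnMax.go with budget m = 0 keeps the whole remainder as the last piece
theorem go_zero (l cur : List Char) (acc : List (List Char)) (fuel : Nat) (h : 0 < fuel) :
    PySem.Chars.splitOnMax.go ['_'] fuel 0 l cur acc = ((cur.reverse ++ l) :: acc).reverse := by
  obtain ⟨f, rfl⟩ : ∃ f, fuel = f + 1 := ⟨fuel - 1, by omega⟩
  cases l <;> simp [PySem.Chars.splitOnMax.go]

-- splitOnMax.go over a '_'-free run p followed by '_': one cut
theorem go_step (p : List Char) (hp : '_' ∉ p) (rest cur : List Char) (acc : List (List Char))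
    (fuel m : Nat) (hf : p.length + rest.length + 1 < fuel) (hm : m ≠ 0) :
    PySem.Chars.splitOnMax.go ['_'] fuel m (p ++ '_' :: rest) cur acc =
      PySem.Chars.splitOnMax.go ['_'] (fuel - p.length - 1) (m - 1) rest []
        ((cur.reverse ++ p) :: acc) := by
  induction p generalizing fuel cur with
  | nil =>
      obtain ⟨f, rfl⟩ : ∃ f, fuel = f + 1 := ⟨fuel - 1, by omega⟩
      simp [PySem.Chars.splitOnMax.go, hm, List.isPrefixOf]
  | cons c p ih =>
      have hc : c ≠ '_' := fun h => hp (h ▸ List.mem_cons_self)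
      have hp' : '_' ∉ p := fun h => hp (List.mem_cons_of_mem _ h)
      obtain ⟨f, rfl⟩ : ∃ f, fuel = f + 1 := ⟨fuel - 1, by omega⟩
      have hlen : p.length + rest.length + 1 < f := by simp at hf; omega
      rw [show ((c :: p) ++ '_' :: rest) = c :: (p ++ '_' :: rest) by simp]
      have hpre : List.isPrefixOf ['_'] (c :: (p ++ '_' :: rest)) = false := by
        simp [List.isPrefixOf]
        exact fun h => absurd h.symm hc
      simp only [PySem.Chars.splitOnMax.go, hm, hpre, if_false, Bool.false_eq_true]
      rw [ih hp' (c :: cur) f hlen]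
      simp only [List.reverse_cons, List.length_cons]
      congr 2
      · omega
      · simp

-- B's split("_", 2) on the decomposed string
theorem splitOnMax_decomp (p0 p1 rest : List Char) (h0 : '_' ∉ p0) (h1 : '_' ∉ p1) :
    PySem.Chars.splitOnMax (p0 ++ '_' :: (p1 ++ '_' :: rest)) ['_'] 2 = [p0, p1, rest] := by
  unfold PySem.Chars.splitOnMax
  rw [if_neg (by norm_num)]
  rw [show ((2 : Int).toNat) = 2 from rfl]
  have hL : (p0 ++ '_' :: (p1 ++ '_' :: rest)).length
      = p0.length + p1.length + rest.length + 2 := by simp; omega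
  rw [hL]
  rw [go_step p0 h0 (p1 ++ '_' :: rest) [] [] _ 2
    (by simp only [List.length_append, List.length_cons]; omega) (by omega)]
  rw [go_step p1 h1 rest [] _ _ 1 (by omega) (by omega)]
  rw [go_zero _ _ _ _ (by omega)]
  simp

-- first-occurrence decomposition from membership
theorem first_split (cs : List Char) (h : '_' ∈ cs) :
    ∃ p t, cs = p ++ '_' :: t ∧ '_' ∉ p := by
  induction cs with
  | nil => cases h
  | cons c cs ih =>
      by_cases hc : c = '_'
      · exact ⟨[], cs, by simp [hc], by simp⟩
      · obtain ⟨p, t, rfl, hp⟩ := ih (by cases h with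
          | head => exact absurd rfl hc
          | tail _ h => exact h)
        exact ⟨c :: p, t, rfl, by simp [hp, Ne.symm, hc]⟩

-- two underscores give the full decomposition
theorem decomp (cs : List Char) (h : 2 ≤ cs.count '_') :
    ∃ p0 p1 rest, cs = p0 ++ '_' :: (p1 ++ '_' :: rest) ∧ '_' ∉ p0 ∧ '_' ∉ p1 := by
  obtain ⟨p0, t, rfl, h0⟩ := first_split cs (List.count_pos_iff.mp (by omega))
  have hcp : p0.count '_' = 0 := List.count_eq_zero.mpr h0
  rw [List.count_append, hcp, List.count_cons] at h
  have ht : '_' ∈ t := by simp at h; exact h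
  obtain ⟨p1, rest, rfl, h1⟩ := first_split t ht
  exact ⟨p0, p1, rest, rfl, h0, h1⟩

-- ===== VERDICT (by name: the statement is the Claim_ definition above) =====
set_option maxHeartbeats 1000000 in
theorem splitTemp_spec : Claim_equal_splitTemp := by
  intro s _ hpre
  obtain ⟨p0, p1, rest, hdec, h0, h1⟩ := decomp s.toList hpre
  have hA : splitTemp s = (String.ofList p1, String.ofList rest) := by
    unfold splitTemp
    rw [hdec, fold0 p0 h0 _ [], fold1 p1 h1 rest [] []]
    show (String.ofList (PySem.List.pyGetD ([] ++ [[] ++ p1] ++ [rest]) 0 []),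
          String.ofList (PySem.List.pyGetD ([] ++ [[] ++ p1] ++ [rest]) 1 [])) = _
    simp [pysem]
  have hB : splitTemp_alt s = (String.ofList p1, String.ofList rest) := by
    have hs : PySem.Str.splitMax? s "_" 2
        = some [String.ofList p0, String.ofList p1, String.ofList rest] := by
      unfold PySem.Str.splitMax? PySem.Chars.splitMax?
      rw [show ("_" : String).toList = ['_'] from rfl, hdec]
      simp [splitOnMax_decomp p0 p1 rest h0 h1]
    unfold splitTemp_alt
    rw [hs]
    show (PySem.List.pyGetD [String.ofList p0, String.ofList p1, String.ofList rest] 1 "",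
          PySem.List.pyGetD [String.ofList p0, String.ofList p1, String.ofList rest] 2 "") = _
    simp [pysem]
  unfold Spec_splitTemp
  rw [hA, hB]
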